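-- pv_equiv track=rewrite | github.com/kaya53/daily-algorithm | IN-PROGRESS/B9205_drinking-beer/B9205_drinking-beer.py | solution
-- ===== SOURCE A (Python) =====
-- from collections import deque
--
-- def solution(n, si, sj, stores, ei, ej):
--     q = deque([(si, sj)])  # 위치
--     visited = [0] * n  # 편의점 방문
--     while q:
--         ci, cj = q.popleft()
--         # 20병으로 페스티벌 갈 수 있음
--         if abs(ei-ci)+abs(ej-cj) <= 1000:
--             return 'happy'
--         for k in range(n):
--             if visited[k]: continue
--             ni, nj = stores[k]
--             # 현재 시점에서 편의점까지 갈 수 있는 경우만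
--             if abs(ni-ci)+abs(nj-cj) <= 1000:
--                 q.append((ni, nj))
--                 visited[k] = 1
--     return 'sad'
-- ===== SOURCE B (Python) =====
-- def solution(n, si, sj, stores, ei, ej):
--     pts = list(stores[:max(n, 0)])
--     reached = [(si, sj)]
--     marked = [False] * len(pts)
--     changed = True
--     while changed:
--         changed = False
--         for k, (x, y) in enumerate(pts):
--             if not marked[k] and any(abs(x - a) + abs(y - b) <= 1000 for (a, b) in reached):
--                 marked[k] = True
--                 reached.append((x, y))
--                 changed = True
--     return 'happy' if any(abs(ei - a) + abs(ej - b) <= 1000 for (a, b) in reached) else 'sad'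
-- ===== Notes on version B (the rewrite author's own statement) =====
-- stated objective: alternative
-- what changed: Replaces A's BFS over a deque with early exit by a round-based fixpoint saturation: repeatedly sweep the store list adding every unmarked store within 1000 of any already-reached point until nothing changes, then test the festival against the full reached set.
import Mathlib
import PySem

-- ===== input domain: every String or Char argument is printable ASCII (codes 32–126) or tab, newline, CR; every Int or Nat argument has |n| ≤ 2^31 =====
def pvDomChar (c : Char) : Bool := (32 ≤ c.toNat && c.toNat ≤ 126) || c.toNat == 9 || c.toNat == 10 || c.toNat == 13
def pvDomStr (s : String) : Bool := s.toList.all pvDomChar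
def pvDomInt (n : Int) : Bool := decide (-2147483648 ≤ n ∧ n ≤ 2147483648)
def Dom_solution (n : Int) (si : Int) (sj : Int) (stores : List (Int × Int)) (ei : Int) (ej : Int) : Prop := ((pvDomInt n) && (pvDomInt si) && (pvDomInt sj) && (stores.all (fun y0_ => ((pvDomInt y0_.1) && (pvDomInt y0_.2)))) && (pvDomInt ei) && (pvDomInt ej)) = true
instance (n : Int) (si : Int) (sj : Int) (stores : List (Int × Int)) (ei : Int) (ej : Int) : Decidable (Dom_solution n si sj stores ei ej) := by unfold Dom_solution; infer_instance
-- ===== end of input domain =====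

-- B replaces A's early-exit BFS over a deque by a round-based fixpoint saturation of the full
-- reachable set, then tests the festival once at the end (objective: alternative algorithm,
-- same return value; neither version mutates its arguments).

-- ===== PORT A =====
-- A's inner 'for k in range(n)' loop: skip visited stores, enqueue (and mark) every store
-- within Manhattan distance 1000 of the current position (ci, cj).
-- 'visited.getD k.toNat true' ports 'visited[k]'; the default 'true' is only an in-range
-- guard for totality: in every call A makes, k < len(visited).
def forA (stores : List (Int × Int)) (ci cj : Int) :
    List Int → List (Int × Int) → List Bool → List (Int × Int) × List Bool
  | [], q, visited => (q, visited)
  | k :: ks, q, visited =>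
    if visited.getD k.toNat true then
      forA stores ci cj ks q visited
    else
      let p := stores.getD k.toNat (0, 0)
      if |p.1 - ci| + |p.2 - cj| ≤ 1000 then
        forA stores ci cj ks (q ++ [p]) (visited.set k.toNat true)
      else
        forA stores ci cj ks q visited

-- termination helper for loopA (cited by its decreasing_by): flipping a false mark to true
lemma count_false_set (v : List Bool) (i : Nat) (h : v.getD i true = false) :
    (v.set i true).count false + 1 = v.count false := by
  induction v generalizing i with
  | nil => simp [List.getD] at h
  | cons b t ih =>
    cases i with
    | zero => simp [List.getD] at h; subst h; simp
    | succ i =>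
      have := ih i (by simpa [List.getD] using h)
      simp [List.count_cons]; omega

-- termination helper for loopA: each enqueue consumes one unvisited mark
lemma forA_measure (stores : List (Int × Int)) (ci cj : Int) :
    ∀ (ks : List Int) (q : List (Int × Int)) (visited : List Bool),
      (forA stores ci cj ks q visited).1.length + (forA stores ci cj ks q visited).2.count false
        ≤ q.length + visited.count false := by
  intro ks
  induction ks with
  | nil => intro q visited; simp [forA]
  | cons k ks ih =>
    intro q visited
    simp only [forA]
    split
    · exact ih q visited
    · split
      · have h1 := ih (q ++ [stores.getD k.toNat (0,0)]) (visited.set k.toNat true)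
        have h2 := count_false_set visited k.toNat (by simp_all)
        simp only [List.length_append, List.length_cons, List.length_nil] at h1
        omega
      · exact ih q visited

-- A's 'while q' loop: pop from the left, return 'happy' if the festival is in reach,
-- otherwise enqueue all newly reachable stores.
def loopA (stores : List (Int × Int)) (n ei ej : Int) :
    List (Int × Int) → List Bool → String
  | [], _ => "sad"
  | c :: q, visited =>
    if |ei - c.1| + |ej - c.2| ≤ 1000 then "happy"
    else
      loopA stores n ei ej (forA stores c.1 c.2 (PySem.List.pyRange 0 n 1) q visited).1
        (forA stores c.1 c.2 (PySem.List.pyRange 0 n 1) q visited).2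
termination_by q visited => q.length + visited.count false
decreasing_by
  have := forA_measure stores c.1 c.2 (PySem.List.pyRange 0 n 1) q visited
  simp only [List.length_cons]
  omega

def solution (n : Int) (si : Int) (sj : Int) (stores : List (Int × Int)) (ei : Int) (ej : Int) : String :=
  loopA stores n ei ej [(si, sj)] (List.replicate n.toNat false)

-- ===== PORT B =====
-- 'any(abs(x-a)+abs(y-b) <= 1000 for (a,b) in reached)'
def anyClose (x y : Int) (reached : List (Int × Int)) : Bool :=
  reached.any fun a => decide (|x - a.1| + |y - a.2| ≤ 1000)

-- one 'for k, (x, y) in enumerate(pts)' sweep; k is the enumeration index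
-- ('marked.getD k true' ports 'marked[k]'; default true only an in-range guard)
def passB : List (Int × Int) → Nat → List Bool → List (Int × Int) → Bool →
    List Bool × List (Int × Int) × Bool
  | [], _, marked, reached, changed => (marked, reached, changed)
  | p :: rest, k, marked, reached, changed =>
    if !(marked.getD k true) && anyClose p.1 p.2 reached then
      passB rest (k + 1) (marked.set k true) (reached ++ [p]) true
    else
      passB rest (k + 1) marked reached changed

-- termination helper for satB (cited by its decreasing_by): a sweep started with
-- changed = false that reports changed = true has marked at least one new store
lemma passB_count : ∀ (rest : List (Int × Int)) (k : Nat) (marked : List Bool)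
    (reached : List (Int × Int)) (ch : Bool),
    (passB rest k marked reached ch).1.count false ≤ marked.count false ∧
    ((passB rest k marked reached ch).2.2 = true →
      ch = true ∨ (passB rest k marked reached ch).1.count false < marked.count false) := by
  intro rest
  induction rest with
  | nil => intro k marked reached ch; simp [passB]
  | cons p rest ih =>
    intro k marked reached ch
    simp only [passB]
    split
    · rename_i hc
      have hm : marked.getD k true = false := by
        cases h' : marked.getD k true <;> simp_all
      have h1 := ih (k+1) (marked.set k true) (reached ++ [p]) true
      have h2 := count_false_set marked k hm
      exact ⟨by omega, fun _ => Or.inr (by omega)⟩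
    · exact ih (k+1) marked reached ch

-- B's 'while changed' loop: sweep until a sweep adds nothing
def satB (pts : List (Int × Int)) (marked : List Bool) (reached : List (Int × Int)) :
    List (Int × Int) :=
  if (passB pts 0 marked reached false).2.2 then
    satB pts (passB pts 0 marked reached false).1 (passB pts 0 marked reached false).2.1
  else
    (passB pts 0 marked reached false).2.1
termination_by marked.count false
decreasing_by
  have h := passB_count pts 0 marked reached false
  rename_i hch
  rcases h.2 hch with h' | h'
  · exact absurd h' (by simp)
  · exact h'

def solution_alt (n : Int) (si : Int) (sj : Int) (stores : List (Int × Int)) (ei : Int) (ej : Int) : String :=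
  let pts := stores.take n.toNat
  let reached := satB pts (List.replicate pts.length false) [(si, sj)]
  if reached.any (fun a => decide (|ei - a.1| + |ej - a.2| ≤ 1000)) then "happy" else "sad"

-- ===== PRECONDITION & SPEC =====
-- Pre_ excludes exactly the inputs on which A raises IndexError: when n > len(stores), A's
-- inner loop reads stores[k] for k ≥ len(stores) unless it returns 'happy' immediately
-- because the start is already within Manhattan distance 1000 of the festival.
def Pre_solution (n : Int) (si : Int) (sj : Int) (stores : List (Int × Int)) (ei : Int) (ej : Int) : Prop :=
  n ≤ (stores.length : Int) ∨ |ei - si| + |ej - sj| ≤ 1000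
instance (n : Int) (si : Int) (sj : Int) (stores : List (Int × Int)) (ei : Int) (ej : Int) : Decidable (Pre_solution n si sj stores ei ej) := by unfold Pre_solution; infer_instance

def pvWitness_solution : Int × Int × Int × (List (Int × Int)) × Int × Int := (1, 0, 0, [(500, 500)], 900, 900)

def Spec_solution (n : Int) (si : Int) (sj : Int) (stores : List (Int × Int)) (ei : Int) (ej : Int) (out : String) : Prop := out = solution_alt n si sj stores ei ej
instance (n : Int) (si : Int) (sj : Int) (stores : List (Int × Int)) (ei : Int) (ej : Int) (out : String) : Decidable (Spec_solution n si sj stores ei ej out) := by unfold Spec_solution; infer_instance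

-- ===== CLAIM (what is proved, stated in full; the proofs are below) =====
def Claim_equal_solution : Prop := ∀ (n : Int) (si : Int) (sj : Int) (stores : List (Int × Int)) (ei : Int) (ej : Int), Dom_solution n si sj stores ei ej → Pre_solution n si sj stores ei ej → Spec_solution n si sj stores ei ej (solution n si sj stores ei ej)

-- ===== LEMMAS AND PROOFS =====

-- Reachability through the first n stores, as BFS state (pending queue q0, visited marks v):
-- the set of points A's loop can still reach from state (q0, v).
inductive RA (stores : List (Int × Int)) (n : Int) (q0 : List (Int × Int)) (v : List Bool) :
    (Int × Int) → Prop
  | base (p : Int × Int) : p ∈ q0 → RA stores n q0 v p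
  | step (p : Int × Int) (k : Nat) : RA stores n q0 v p → (k : Int) < n →
      v.getD k true = false →
      |(stores.getD k (0, 0)).1 - p.1| + |(stores.getD k (0, 0)).2 - p.2| ≤ 1000 →
      RA stores n q0 v (stores.getD k (0, 0))

-- Plain reachability from the start point s through the store list pts.
inductive RB (pts : List (Int × Int)) (s : Int × Int) : (Int × Int) → Prop
  | base : RB pts s s
  | step (p q : Int × Int) : RB pts s p → q ∈ pts → |q.1 - p.1| + |q.2 - p.2| ≤ 1000 →
      RB pts s q

lemma getD_set_true_false {v : List Bool} {j k : Nat}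
    (h : (v.set j true).getD k true = false) : v.getD k true = false := by
  induction v generalizing j k with
  | nil => simp [List.getD] at h
  | cons b t ih =>
    cases j with
    | zero => cases k with
      | zero => simp [List.getD] at h
      | succ k => simpa [List.getD] using h
    | succ j => cases k with
      | zero => simpa [List.getD] using h
      | succ k => exact ih (by simpa [List.getD] using h)

lemma getD_set_ne {v : List Bool} {j k : Nat} (hne : j ≠ k) :
    (v.set j true).getD k true = v.getD k true := by
  induction v generalizing j k with
  | nil => simp
  | cons b t ih =>
    cases j with
    | zero => cases k with
      | zero => exact absurd rfl hne
      | succ k => simp [List.getD]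
    | succ j => cases k with
      | zero => simp [List.getD]
      | succ k => simpa [List.getD] using ih (by omega)

lemma forA_mem_left (stores : List (Int × Int)) (ci cj : Int) :
    ∀ (ks : List Int) (q : List (Int × Int)) (v : List Bool) (p : Int × Int),
      p ∈ q → p ∈ (forA stores ci cj ks q v).1 := by
  intro ks
  induction ks with
  | nil => intro q v p hp; simpa [forA] using hp
  | cons k ks ih =>
    intro q v p hp
    simp only [forA]
    split
    · exact ih q v p hp
    · split
      · exact ih _ _ p (by simp [hp])
      · exact ih q v p hp

lemma forA_getD_false (stores : List (Int × Int)) (ci cj : Int) :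
    ∀ (ks : List Int) (q : List (Int × Int)) (v : List Bool) (k : Nat),
      (forA stores ci cj ks q v).2.getD k true = false → v.getD k true = false := by
  intro ks
  induction ks with
  | nil => intro q v k h; simpa [forA] using h
  | cons j ks ih =>
    intro q v k h
    simp only [forA] at h
    split at h
    · exact ih q v k h
    · split at h
      · exact getD_set_true_false (ih _ _ k h)
      · exact ih q v k h

lemma forA_adds (stores : List (Int × Int)) (ci cj : Int) :
    ∀ (ks : List Int) (q : List (Int × Int)) (v : List Bool) (kk : Int),
      (∀ j ∈ ks, 0 ≤ j) → kk ∈ ks → v.getD kk.toNat true = false →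
      |(stores.getD kk.toNat (0, 0)).1 - ci| + |(stores.getD kk.toNat (0, 0)).2 - cj| ≤ 1000 →
      stores.getD kk.toNat (0, 0) ∈ (forA stores ci cj ks q v).1 := by
  intro ks
  induction ks with
  | nil => intro q v kk _ hmem _ _; simp at hmem
  | cons j ks ih =>
    intro q v kk hpos hmem hv hd
    have hj : 0 ≤ j := hpos j (by simp)
    have hk : 0 ≤ kk := hpos kk hmem
    by_cases hkj : kk = j
    · subst hkj
      simp only [forA]
      split
      · simp_all
      · exact forA_mem_left stores ci cj ks _ _ _ (by simp)
    · have hmem' : kk ∈ ks := by rcases List.mem_cons.1 hmem with h | h; exact absurd h hkj; exact h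
      have hpos' : ∀ x ∈ ks, 0 ≤ x := fun x hx => hpos x (List.mem_cons_of_mem _ hx)
      simp only [forA]
      split
      · exact ih q v kk hpos' hmem' hv hd
      · split
        · have hne : j.toNat ≠ kk.toNat := by omega
          exact ih _ _ kk hpos' hmem' (by rw [getD_set_ne hne]; exact hv) hd
        · exact ih q v kk hpos' hmem' hv hd

lemma forA_marked_mem (stores : List (Int × Int)) (ci cj : Int) :
    ∀ (ks : List Int) (q : List (Int × Int)) (v : List Bool) (k : Nat),
      v.getD k true = false → (forA stores ci cj ks q v).2.getD k true = true →
      stores.getD k (0, 0) ∈ (forA stores ci cj ks q v).1 := by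
  intro ks
  induction ks with
  | nil => intro q v k hf ht; simp [forA] at hf ht; rw [hf] at ht; exact absurd ht (by simp)
  | cons j ks ih =>
    intro q v k hf ht
    simp only [forA] at ht ⊢
    by_cases h1 : v.getD j.toNat true = true
    · simp only [if_pos h1] at ht ⊢
      exact ih q v k hf ht
    · simp only [if_neg h1] at ht ⊢
      by_cases h2 : |(stores.getD j.toNat (0, 0)).1 - ci| + |(stores.getD j.toNat (0, 0)).2 - cj| ≤ 1000
      · simp only [if_pos h2] at ht ⊢
        by_cases hkj : k = j.toNat
        · subst hkj
          exact forA_mem_left stores ci cj ks _ _ _ (by simp)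
        · have hne : j.toNat ≠ k := fun h => hkj h.symm
          exact ih _ _ k (by rw [getD_set_ne hne]; exact hf) ht
      · simp only [if_neg h2] at ht ⊢
        exact ih q v k hf ht

lemma forA_mem_inv (stores : List (Int × Int)) (ci cj : Int) :
    ∀ (ks : List Int) (q : List (Int × Int)) (v : List Bool) (p : Int × Int),
      p ∈ (forA stores ci cj ks q v).1 →
      p ∈ q ∨ ∃ j : Int, j ∈ ks ∧ v.getD j.toNat true = false ∧
        |(stores.getD j.toNat (0, 0)).1 - ci| + |(stores.getD j.toNat (0, 0)).2 - cj| ≤ 1000 ∧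
        p = stores.getD j.toNat (0, 0) := by
  intro ks
  induction ks with
  | nil => intro q v p hp; left; simpa [forA] using hp
  | cons j ks ih =>
    intro q v p hp
    simp only [forA] at hp
    split at hp
    · rcases ih q v p hp with h | ⟨j', hm, hv', hd', he'⟩
      · exact Or.inl h
      · exact Or.inr ⟨j', List.mem_cons_of_mem _ hm, hv', hd', he'⟩
    · split at hp
      · rcases ih _ _ p hp with h | ⟨j', hm, hv', hd', he'⟩
        · rcases List.mem_append.1 h with h' | h'
          · exact Or.inl h'
          · refine Or.inr ⟨j, by simp, by simp_all, by simp_all, by simpa using h'⟩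
        · exact Or.inr ⟨j', List.mem_cons_of_mem _ hm, getD_set_true_false hv', hd', he'⟩
      · rcases ih q v p hp with h | ⟨j', hm, hv', hd', he'⟩
        · exact Or.inl h
        · exact Or.inr ⟨j', List.mem_cons_of_mem _ hm, hv', hd', he'⟩

lemma RA_nil (stores : List (Int × Int)) (n : Int) (v : List Bool) (p : Int × Int) :
    ¬ RA stores n [] v p := by
  intro h
  induction h with
  | base _ hmem => simp at hmem
  | step _ _ _ _ _ _ ih => exact ih

lemma RA_to_next (stores : List (Int × Int)) (n : Int) (c : Int × Int)
    (q : List (Int × Int)) (v : List Bool) (p : Int × Int)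
    (h : RA stores n (c :: q) v p) :
    p = c ∨ RA stores n (forA stores c.1 c.2 (PySem.List.pyRange 0 n 1) q v).1
      (forA stores c.1 c.2 (PySem.List.pyRange 0 n 1) q v).2 p := by
  induction h with
  | base p hp =>
    rcases List.mem_cons.1 hp with h | h
    · exact Or.inl h
    · exact Or.inr (RA.base p (forA_mem_left stores c.1 c.2 _ q v p h))
  | step p k hra hk hv hd ih =>
    right
    rcases ih with rfl | hnext
    · apply RA.base
      have hnat : ((k : Int)).toNat = k := Int.toNat_natCast k
      have hmem : (k : Int) ∈ PySem.List.pyRange 0 n 1 :=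
        PySem.List.mem_pyRange_one.2 ⟨Int.natCast_nonneg k, hk⟩
      have := forA_adds stores p.1 p.2 (PySem.List.pyRange 0 n 1) q v (k : Int)
        (fun j hj => (PySem.List.mem_pyRange_one.1 hj).1) hmem (by rw [hnat]; exact hv)
        (by rw [hnat]; exact hd)
      rwa [hnat] at this
    · by_cases hv' : (forA stores c.1 c.2 (PySem.List.pyRange 0 n 1) q v).2.getD k true = false
      · exact RA.step p k hnext hk hv' hd
      · have ht : (forA stores c.1 c.2 (PySem.List.pyRange 0 n 1) q v).2.getD k true = true := by
          cases h' : (forA stores c.1 c.2 (PySem.List.pyRange 0 n 1) q v).2.getD k true <;> simp_all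
        exact RA.base _ (forA_marked_mem stores c.1 c.2 _ q v k hv ht)

lemma RA_of_next (stores : List (Int × Int)) (n : Int) (c : Int × Int)
    (q : List (Int × Int)) (v : List Bool) (p : Int × Int)
    (h : RA stores n (forA stores c.1 c.2 (PySem.List.pyRange 0 n 1) q v).1
      (forA stores c.1 c.2 (PySem.List.pyRange 0 n 1) q v).2 p) :
    RA stores n (c :: q) v p := by
  induction h with
  | base p hp =>
    rcases forA_mem_inv stores c.1 c.2 _ q v p hp with h | ⟨j, hm, hv', hd', he'⟩
    · exact RA.base p (List.mem_cons_of_mem _ h)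
    · have hj := PySem.List.mem_pyRange_one.1 hm
      have hc : RA stores n (c :: q) v c := RA.base c (by simp)
      have hlt : ((j.toNat : Int)) < n := by omega
      have hnat : ((j.toNat : Int)).toNat = j.toNat := Int.toNat_natCast _
      subst he'
      exact RA.step c j.toNat hc hlt hv' hd'
  | step p k hra hk hv hd ih =>
    exact RA.step p k ih hk (forA_getD_false stores c.1 c.2 _ q v k hv) hd

lemma loopA_happy (stores : List (Int × Int)) (n ei ej : Int) :
    ∀ (m : Nat) (q : List (Int × Int)) (v : List Bool), q.length + v.count false ≤ m →
      (loopA stores n ei ej q v = "happy" ↔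
        ∃ p, RA stores n q v p ∧ |ei - p.1| + |ej - p.2| ≤ 1000) := by
  intro m
  induction m with
  | zero =>
    intro q v hm
    have hq : q = [] := by cases q with | nil => rfl | cons a b => simp at hm
    subst hq
    rw [loopA]
    constructor
    · intro h; exact absurd h (by decide)
    · rintro ⟨p, hp, _⟩; exact absurd hp (RA_nil stores n v p)
  | succ m ih =>
    intro q v hm
    cases q with
    | nil =>
      rw [loopA]
      constructor
      · intro h; exact absurd h (by decide)
      · rintro ⟨p, hp, _⟩; exact absurd hp (RA_nil stores n v p)
    | cons c q =>
      rw [loopA]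
      by_cases hc : |ei - c.1| + |ej - c.2| ≤ 1000
      · rw [if_pos hc]
        constructor
        · intro _; exact ⟨c, RA.base c (by simp), hc⟩
        · intro _; rfl
      · rw [if_neg hc]
        have hmeas := forA_measure stores c.1 c.2 (PySem.List.pyRange 0 n 1) q v
        have hm' : (forA stores c.1 c.2 (PySem.List.pyRange 0 n 1) q v).1.length +
            (forA stores c.1 c.2 (PySem.List.pyRange 0 n 1) q v).2.count false ≤ m := by
          simp only [List.length_cons] at hm; omega
        rw [ih _ _ hm']
        constructor
        · rintro ⟨p, hp, hd⟩; exact ⟨p, RA_of_next stores n c q v p hp, hd⟩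
        · rintro ⟨p, hp, hd⟩
          rcases RA_to_next stores n c q v p hp with rfl | h
          · exact absurd hd hc
          · exact ⟨p, h, hd⟩

lemma loopA_out (stores : List (Int × Int)) (n ei ej : Int) :
    ∀ (m : Nat) (q : List (Int × Int)) (v : List Bool), q.length + v.count false ≤ m →
      loopA stores n ei ej q v = "happy" ∨ loopA stores n ei ej q v = "sad" := by
  intro m
  induction m with
  | zero =>
    intro q v hm
    have hq : q = [] := by cases q with | nil => rfl | cons a b => simp at hm
    subst hq
    rw [loopA]; right; rfl
  | succ m ih =>
    intro q v hm
    cases q with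
    | nil => rw [loopA]; right; rfl
    | cons c q =>
      rw [loopA]
      by_cases hc : |ei - c.1| + |ej - c.2| ≤ 1000
      · rw [if_pos hc]; left; rfl
      · rw [if_neg hc]
        have hmeas := forA_measure stores c.1 c.2 (PySem.List.pyRange 0 n 1) q v
        apply ih
        simp only [List.length_cons] at hm; omega

lemma getD_replicate_false (m k : Nat) :
    (List.replicate m false).getD k true = (if k < m then false else true) := by
  induction m generalizing k with
  | zero => simp [List.getD]
  | succ m ih =>
    cases k with
    | zero => simp [List.getD]
    | succ k => simp only [List.replicate_succ, List.getD_cons_succ, ih, Nat.add_lt_add_iff_right]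

lemma RA_iff_RB (stores : List (Int × Int)) (n si sj : Int)
    (hn : n ≤ (stores.length : Int)) (p : Int × Int) :
    RA stores n [(si, sj)] (List.replicate n.toNat false) p ↔
      RB (stores.take n.toNat) (si, sj) p := by
  constructor
  · intro h
    induction h with
    | base p hp =>
      have : p = (si, sj) := by simpa using hp
      subst this; exact RB.base
    | step p k hra hk hv hd ih =>
      rw [getD_replicate_false] at hv
      have hkn : k < n.toNat := by by_contra h'; simp [h'] at hv
      have hkl : k < stores.length := by omega
      have hget : stores.getD k (0, 0) = stores[k] := List.getD_eq_getElem stores (0, 0) hkl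
      have hmem : stores[k] ∈ stores.take n.toNat := by
        have hkt : k < (stores.take n.toNat).length := by simp [List.length_take]; omega
        have : (stores.take n.toNat)[k] = stores[k] := List.getElem_take
        rw [← this]
        exact List.getElem_mem hkt
      rw [hget]
      exact RB.step p stores[k] ih hmem (by rw [← hget]; exact hd)
  · intro h
    induction h with
    | base => exact RA.base _ (by simp)
    | step p q hrb hq hd ih =>
      obtain ⟨k, hk, he⟩ := List.mem_iff_getElem.1 hq
      have hkn : k < n.toNat := by simp [List.length_take] at hk; omega
      have hkl : k < stores.length := by omega
      have hlt : (k : Int) < n := by omega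
      have hv : (List.replicate n.toNat false).getD k true = false := by
        rw [getD_replicate_false]; simp [hkn]
      have hget : stores.getD k (0, 0) = q := by
        rw [List.getD_eq_getElem stores (0, 0) hkl, ← he]
        exact (List.getElem_take).symm
      have := RA.step (stores := stores) (n := n) (q0 := [(si, sj)])
        (v := List.replicate n.toNat false) p k ih hlt hv (by rw [hget]; exact hd)
      rwa [hget] at this

-- invariant of B's saturation loop
def InvB (pts : List (Int × Int)) (s : Int × Int) (marked : List Bool)
    (reached : List (Int × Int)) : Prop :=
  s ∈ reached ∧ (∀ p ∈ reached, RB pts s p) ∧ marked.length = pts.length ∧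
  (∀ k, k < pts.length → marked.getD k true = true → pts.getD k (0, 0) ∈ reached)

lemma passB_inv (pts : List (Int × Int)) (s : Int × Int) :
    ∀ (rest : List (Int × Int)) (k : Nat) (marked : List Bool)
      (reached : List (Int × Int)) (ch : Bool), rest = pts.drop k →
      InvB pts s marked reached →
      InvB pts s (passB rest k marked reached ch).1 (passB rest k marked reached ch).2.1 := by
  intro rest
  induction rest with
  | nil => intro k marked reached ch _ hInv; simpa [passB] using hInv
  | cons p rest ih =>
    intro k marked reached ch hrest hInv
    have hk : k < pts.length := by
      by_contra h'
      rw [List.drop_eq_nil_of_le (by omega)] at hrest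
      simp at hrest
    have hp : pts[k]? = some p := by
      have h0 : (pts.drop k)[0]? = some p := by rw [← hrest]; rfl
      simpa using h0
    have hpe : pts[k] = p := by
      have := List.getElem?_eq_getElem (l := pts) (i := k) hk
      rw [hp] at this; exact (Option.some.inj this).symm
    have hrest' : rest = pts.drop (k + 1) := by
      have : pts.drop (k + 1) = (pts.drop k).drop 1 := by
        rw [List.drop_drop]
      rw [this, ← hrest]
      rfl
    simp only [passB]
    split
    · rename_i hbr
      have hm0 : marked.getD k true = false := by
        cases h' : marked.getD k true <;> simp_all
      have hany : anyClose p.1 p.2 reached = true := by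
        cases h' : anyClose p.1 p.2 reached <;> simp_all
      obtain ⟨a, ha, hda⟩ := List.any_eq_true.1 hany
      have hda' : |p.1 - a.1| + |p.2 - a.2| ≤ 1000 := of_decide_eq_true hda
      apply ih (k + 1) _ _ true hrest'
      refine ⟨by simp [hInv.1], ?_, by simp [hInv.2.2.1], ?_⟩
      · intro x hx
        rcases List.mem_append.1 hx with hx | hx
        · exact hInv.2.1 x hx
        · have : x = p := by simpa using hx
          subst this
          exact RB.step a x (hInv.2.1 a ha) (hpe ▸ List.getElem_mem hk) hda'
      · intro k' hk' hm'
        by_cases hkk : k = k'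
        · subst hkk
          have : pts.getD k (0, 0) = p := by
            rw [List.getD_eq_getElem pts (0, 0) hk, hpe]
          rw [this]; simp
        · rw [getD_set_ne hkk] at hm'
          exact List.mem_append_left _ (hInv.2.2.2 k' hk' hm')
    · exact ih (k + 1) marked reached ch hrest' hInv

lemma passB_stays_true : ∀ (rest : List (Int × Int)) (k : Nat) (marked : List Bool)
    (reached : List (Int × Int)), (passB rest k marked reached true).2.2 = true := by
  intro rest
  induction rest with
  | nil => intro k marked reached; simp [passB]
  | cons p rest ih =>
    intro k marked reached
    simp only [passB]
    split
    · exact ih (k + 1) _ _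
    · exact ih (k + 1) _ _

lemma passB_false (pts : List (Int × Int)) :
    ∀ (rest : List (Int × Int)) (k : Nat) (marked : List Bool)
      (reached : List (Int × Int)) (ch : Bool),
      (passB rest k marked reached ch).2.2 = false →
      (passB rest k marked reached ch).1 = marked ∧
      (passB rest k marked reached ch).2.1 = reached ∧
      (rest = pts.drop k → ∀ j, k ≤ j → j < pts.length → marked.getD j true = false →
        anyClose (pts.getD j (0, 0)).1 (pts.getD j (0, 0)).2 reached = false) := by
  intro rest
  induction rest with
  | nil =>
    intro k marked reached ch h
    refine ⟨rfl, rfl, ?_⟩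
    intro hrest j hj1 hj2 _
    exfalso
    have := congrArg List.length hrest
    simp [List.length_drop] at this
    omega
  | cons p rest ih =>
    intro k marked reached ch h
    by_cases hbr : (!marked.getD k true && anyClose p.1 p.2 reached) = true
    · have heq : passB (p :: rest) k marked reached ch
          = passB rest (k + 1) (marked.set k true) (reached ++ [p]) true := by
        simp only [passB]; rw [if_pos hbr]
      rw [heq, passB_stays_true] at h
      exact absurd h (by simp)
    · have heq : passB (p :: rest) k marked reached ch
          = passB rest (k + 1) marked reached ch := by
        simp only [passB]; rw [if_neg hbr]
      rw [heq] at h ⊢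
      obtain ⟨h1, h2, h3⟩ := ih (k + 1) marked reached ch h
      refine ⟨h1, h2, ?_⟩
      intro hrest j hj1 hj2 hjm
      have hrest' : rest = pts.drop (k + 1) := by
        have hd : pts.drop (k + 1) = (pts.drop k).drop 1 := by rw [List.drop_drop]
        rw [hd, ← hrest]; rfl
      rcases Nat.eq_or_lt_of_le hj1 with heq | hlt
      · rw [← heq] at hjm ⊢
        have hp : pts[k]? = some p := by
          have h0 : (pts.drop k)[0]? = some p := by rw [← hrest]; rfl
          simpa using h0
        have hpe : pts.getD k (0, 0) = p := by
          rw [List.getD_eq_getElem?_getD, hp]; rfl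
        rw [hpe]
        cases hac : anyClose p.1 p.2 reached
        · rfl
        · exfalso; apply hbr; rw [hjm, hac]; rfl
      · exact h3 hrest' j hlt hj2 hjm

lemma satB_fix (pts : List (Int × Int)) (s : Int × Int) (marked : List Bool)
    (reached : List (Int × Int)) (hInv : InvB pts s marked reached)
    (hch : (passB pts 0 marked reached false).2.2 = false) :
    ∀ p, RB pts s p → p ∈ reached := by
  obtain ⟨h1, h2, h3⟩ := passB_false pts pts 0 marked reached false hch
  have hclosed := h3 List.drop_zero.symm
  intro p hp
  induction hp with
  | base => exact hInv.1
  | step p0 qq hr hq hdq ih2 =>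
    obtain ⟨kq, hkq, hqe⟩ := List.mem_iff_getElem.1 hq
    have hgd : pts.getD kq (0, 0) = qq := by rw [List.getD_eq_getElem pts (0, 0) hkq, hqe]
    by_cases hmk : marked.getD kq true = true
    · have := hInv.2.2.2 kq hkq hmk; rwa [hgd] at this
    · have hmf : marked.getD kq true = false := by
        cases h' : marked.getD kq true <;> simp_all
      have hacf := hclosed kq (Nat.zero_le _) hkq hmf
      exfalso
      rw [hgd] at hacf
      have hat : anyClose qq.1 qq.2 reached = true :=
        List.any_eq_true.2 ⟨p0, ih2, decide_eq_true hdq⟩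
      simp [hat] at hacf

lemma satB_spec (pts : List (Int × Int)) (s : Int × Int) :
    ∀ (m : Nat) (marked : List Bool) (reached : List (Int × Int)), marked.count false ≤ m →
      InvB pts s marked reached →
      (∀ p ∈ satB pts marked reached, RB pts s p) ∧
      (∀ p, RB pts s p → p ∈ satB pts marked reached) := by
  intro m
  induction m with
  | zero =>
    intro marked reached hm hInv
    rw [satB]
    by_cases hch : (passB pts 0 marked reached false).2.2 = true
    · exfalso
      rcases (passB_count pts 0 marked reached false).2 hch with h' | h'
      · simp at h'
      · omega
    · rw [if_neg hch]
      obtain ⟨h1, h2, h3⟩ := passB_false pts pts 0 marked reached false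
        (by cases hc : (passB pts 0 marked reached false).2.2 <;> simp_all)
      rw [h2]
      exact ⟨hInv.2.1, satB_fix pts s marked reached hInv
        (by cases hc : (passB pts 0 marked reached false).2.2 <;> simp_all)⟩
  | succ m ih =>
    intro marked reached hm hInv
    rw [satB]
    by_cases hch : (passB pts 0 marked reached false).2.2 = true
    · rw [if_pos hch]
      apply ih
      · rcases (passB_count pts 0 marked reached false).2 hch with h' | h'
        · simp at h'
        · omega
      · exact passB_inv pts s pts 0 marked reached false List.drop_zero.symm hInv
    · rw [if_neg hch]
      obtain ⟨h1, h2, h3⟩ := passB_false pts pts 0 marked reached false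
        (by cases hc : (passB pts 0 marked reached false).2.2 <;> simp_all)
      rw [h2]
      exact ⟨hInv.2.1, satB_fix pts s marked reached hInv
        (by cases hc : (passB pts 0 marked reached false).2.2 <;> simp_all)⟩

lemma solution_alt_happy (n si sj : Int) (stores : List (Int × Int)) (ei ej : Int) :
    solution_alt n si sj stores ei ej = "happy" ↔
      ∃ p, RB (stores.take n.toNat) (si, sj) p ∧ |ei - p.1| + |ej - p.2| ≤ 1000 := by
  unfold solution_alt
  dsimp only
  have hInv : InvB (stores.take n.toNat) (si, sj)
      (List.replicate (stores.take n.toNat).length false) [(si, sj)] := by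
    refine ⟨by simp, ?_, by simp, ?_⟩
    · intro p hp
      have : p = (si, sj) := by simpa using hp
      subst this; exact RB.base
    · intro k hk hm
      rw [getD_replicate_false, if_pos hk] at hm
      exact absurd hm (by simp)
  have hs := satB_spec (stores.take n.toNat) (si, sj) _ _ _ le_rfl hInv
  constructor
  · intro h
    by_cases hany : (satB (stores.take n.toNat)
        (List.replicate (stores.take n.toNat).length false) [(si, sj)]).any
        (fun a => decide (|ei - a.1| + |ej - a.2| ≤ 1000)) = true
    · obtain ⟨a, ha, hda⟩ := List.any_eq_true.1 hany
      exact ⟨a, hs.1 a ha, of_decide_eq_true hda⟩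
    · rw [if_neg hany] at h
      exact absurd h (by decide)
  · rintro ⟨p, hp, hd⟩
    rw [if_pos (List.any_eq_true.2 ⟨p, hs.2 p hp, decide_eq_true hd⟩)]

lemma solution_alt_out (n si sj : Int) (stores : List (Int × Int)) (ei ej : Int) :
    solution_alt n si sj stores ei ej = "happy" ∨ solution_alt n si sj stores ei ej = "sad" := by
  unfold solution_alt
  dsimp only
  split <;> simp

lemma solution_happy (n si sj : Int) (stores : List (Int × Int)) (ei ej : Int) :
    solution n si sj stores ei ej = "happy" ↔
      ∃ p, RA stores n [(si, sj)] (List.replicate n.toNat false) p ∧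
        |ei - p.1| + |ej - p.2| ≤ 1000 :=
  loopA_happy stores n ei ej _ _ _ le_rfl

lemma solution_out (n si sj : Int) (stores : List (Int × Int)) (ei ej : Int) :
    solution n si sj stores ei ej = "happy" ∨ solution n si sj stores ei ej = "sad" := by
  unfold solution
  exact loopA_out stores n ei ej _ _ _ le_rfl

-- ===== VERDICT (by name: the statement is the Claim_ definition above) =====
theorem solution_spec : Claim_equal_solution := by
  intro n si sj stores ei ej hdom hpre
  unfold Spec_solution
  by_cases hc : |ei - si| + |ej - sj| ≤ 1000
  · have hA : solution n si sj stores ei ej = "happy" :=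
      (solution_happy n si sj stores ei ej).2 ⟨(si, sj), RA.base _ (by simp), hc⟩
    have hB : solution_alt n si sj stores ei ej = "happy" :=
      (solution_alt_happy n si sj stores ei ej).2 ⟨(si, sj), RB.base, hc⟩
    rw [hA, hB]
  · have hn : n ≤ (stores.length : Int) := hpre.resolve_right hc
    have key : solution n si sj stores ei ej = "happy" ↔
        solution_alt n si sj stores ei ej = "happy" := by
      rw [solution_happy, solution_alt_happy]
      constructor
      · rintro ⟨p, hp, hd⟩; exact ⟨p, (RA_iff_RB stores n si sj hn p).1 hp, hd⟩
      · rintro ⟨p, hp, hd⟩; exact ⟨p, (RA_iff_RB stores n si sj hn p).2 hp, hd⟩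
    rcases solution_out n si sj stores ei ej with hA | hA
    · rw [hA, key.1 hA]
    · have hB : solution_alt n si sj stores ei ej ≠ "happy" := fun hB => by
        have := key.2 hB
        rw [this] at hA; exact absurd hA (by decide)
      rcases solution_alt_out n si sj stores ei ej with hB' | hB'
      · exact absurd hB' hB
      · rw [hB']
        exact hA
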